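-- pv_equiv track=rewrite | github.com/Prajwalkhandait109/Dailycode | types_of_array.py | maxNtype
-- ===== SOURCE A (Python) =====
-- def maxNtype(arr):
--     #code here.
--     case1 = all(arr[i] < arr[i+1] for i in range(len(arr) - 1))
--
--     case2 = all(arr[i] > arr[i+1] for i in range(len(arr) - 1))
--
--
--     if case1:
--         return 1
--     elif case2:
--         return 2
--
--     count = 0
--     def case3(arr):
--         count = 0
--         for i in range(len(arr)-1):
--             if arr[i] < arr[i+1]:
--                 count += 1
--         if arr[-1] < arr[0]:  # Also check circular break for rotation
--             count += 1
--         return count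
--
--
--     def case4(arr):
--         count = 0
--         for i in range(len(arr)-1):
--             if arr[i] > arr[i+1]:
--                 count += 1
--         if arr[-1] > arr[0]:
--             count += 1
--         return count
--
--
--     if case3(arr) == 1:
--         return 3
--     if case4(arr) == 1:
--         return 4
-- ===== SOURCE B (Python) =====
-- def maxNtype(arr):
--     inc = dec = 0
--     for x, y in zip(arr, arr[1:]):
--         if x < y:
--             inc += 1
--         elif x > y:
--             dec += 1
--     pairs = max(len(arr) - 1, 0)
--     if inc == pairs:
--         return 1
--     if dec == pairs:
--         return 2
--     if inc + (1 if arr[-1] < arr[0] else 0) == 1: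
--         return 3
--     if dec + (1 if arr[-1] > arr[0] else 0) == 1:
--         return 4
--     return None
-- ===== Notes on version B (the rewrite author's own statement) =====
-- stated objective: simpler
-- what changed: Replaces A's four separate adjacent-pair scans (two all() generator passes plus two helper-function counting loops) by one fused pass over zip(arr, arr[1:]) accumulating ascent and descent counters, then classifies by comparing the counters to the pair count and the circular wrap.
import Mathlib
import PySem

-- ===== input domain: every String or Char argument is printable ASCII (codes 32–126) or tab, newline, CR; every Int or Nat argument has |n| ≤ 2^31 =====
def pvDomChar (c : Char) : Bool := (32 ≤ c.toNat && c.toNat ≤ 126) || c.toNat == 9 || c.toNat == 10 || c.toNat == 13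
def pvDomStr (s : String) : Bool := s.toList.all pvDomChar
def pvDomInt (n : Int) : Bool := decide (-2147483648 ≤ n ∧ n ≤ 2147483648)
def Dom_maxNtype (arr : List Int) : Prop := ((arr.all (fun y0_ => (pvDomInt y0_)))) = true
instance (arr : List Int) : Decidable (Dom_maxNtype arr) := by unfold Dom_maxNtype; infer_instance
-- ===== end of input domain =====

-- B replaces A's four separate adjacent-pair scans by a single pass accumulating two counters
-- (objective: simpler/alternative decomposition); equal return value proved for all inputs (A is total).

-- ===== PORT A =====
-- A's case3 helper: counts ascents over range(len(arr)-1), then the circular wrap.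
-- arr[i]/arr[i+1] indices produced by range are always in range, so pyGetD with default 0 is exact;
-- arr[-1]/arr[0] are only reached when arr is non-empty (empty arr returns at case1), so pyGetD is exact there too.
def maxNtypeCase3 (arr : List Int) : Int :=
  let count : Int :=
    (PySem.List.pyRange 0 ((arr.length : Int) - 1)).foldl
      (fun count i =>
        if PySem.List.pyGetD arr i 0 < PySem.List.pyGetD arr (i + 1) 0 then count + 1 else count) 0
  if PySem.List.pyGetD arr (-1) 0 < PySem.List.pyGetD arr 0 0 then count + 1 else count

-- A's case4 helper: counts descents, then the circular wrap.
def maxNtypeCase4 (arr : List Int) : Int :=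
  let count : Int :=
    (PySem.List.pyRange 0 ((arr.length : Int) - 1)).foldl
      (fun count i =>
        if PySem.List.pyGetD arr i 0 > PySem.List.pyGetD arr (i + 1) 0 then count + 1 else count) 0
  if PySem.List.pyGetD arr (-1) 0 > PySem.List.pyGetD arr 0 0 then count + 1 else count

def maxNtype (arr : List Int) : Option Int :=
  let case1 := (PySem.List.pyRange 0 ((arr.length : Int) - 1)).all
      (fun i => decide (PySem.List.pyGetD arr i 0 < PySem.List.pyGetD arr (i + 1) 0))
  let case2 := (PySem.List.pyRange 0 ((arr.length : Int) - 1)).all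
      (fun i => decide (PySem.List.pyGetD arr i 0 > PySem.List.pyGetD arr (i + 1) 0))
  if case1 then some 1
  else if case2 then some 2
  else if maxNtypeCase3 arr = 1 then some 3
  else if maxNtypeCase4 arr = 1 then some 4
  else none

-- ===== PORT B =====
-- single pass over zip(arr, arr[1:]) (arr[1:] = arr.drop 1, exact) with two counters;
-- arr[-1]/arr[0] only reached non-empty (pairs = 0 forces the `some 1` branch), so pyGetD is exact.
def maxNtype_alt (arr : List Int) : Option Int :=
  let s := (arr.zip (arr.drop 1)).foldl
    (fun (s : Int × Int) xy =>
      if xy.1 < xy.2 then (s.1 + 1, s.2)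
      else if xy.1 > xy.2 then (s.1, s.2 + 1)
      else s) (0, 0)
  let pairs : Int := max ((arr.length : Int) - 1) 0
  if s.1 = pairs then some 1
  else if s.2 = pairs then some 2
  else if s.1 + (if PySem.List.pyGetD arr (-1) 0 < PySem.List.pyGetD arr 0 0 then 1 else 0) = 1 then some 3
  else if s.2 + (if PySem.List.pyGetD arr (-1) 0 > PySem.List.pyGetD arr 0 0 then 1 else 0) = 1 then some 4
  else none

-- ===== PRECONDITION & SPEC =====
def Spec_maxNtype (arr : List Int) (out : Option Int) : Prop := out = maxNtype_alt arr
instance (arr : List Int) (out : Option Int) : Decidable (Spec_maxNtype arr out) := by unfold Spec_maxNtype; infer_instance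

-- ===== CLAIM (what is proved, stated in full; the proofs are below) =====
def Claim_equal_maxNtype : Prop := ∀ (arr : List Int), Dom_maxNtype arr → Spec_maxNtype arr (maxNtype arr)

-- ===== LEMMAS AND PROOFS =====

-- the adjacent pairs of (x :: xs), read off through getD-indexing over range
lemma range_map_pairs (x : Int) (xs : List Int) :
    (List.range xs.length).map (fun k => ((x :: xs).getD k 0, (x :: xs).getD (k + 1) 0))
      = (x :: xs).zip xs := by
  induction xs generalizing x with
  | nil => rfl
  | cons y ys ih =>
    simp only [List.length_cons, List.range_succ_eq_map, List.map_cons, List.map_map,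
      Function.comp_def, List.getD_cons_zero, List.getD_cons_succ, List.zip_cons_cons]
    simpa using ih y

-- A's index loop range, mapped to the adjacent pairs
lemma pyRange_pairs (arr : List Int) :
    (PySem.List.pyRange 0 ((arr.length : Int) - 1)).map
        (fun i => (PySem.List.pyGetD arr i 0, PySem.List.pyGetD arr (i + 1) 0))
      = arr.zip (arr.drop 1) := by
  cases arr with
  | nil => rfl
  | cons x xs =>
    have h1 : ((x :: xs).length : Int) - 1 = (xs.length : Nat) := by
      simp
    rw [h1, PySem.List.pyRange_zero_natCast, List.map_map]
    have h2 : ∀ k : Nat,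
        ((fun i => (PySem.List.pyGetD (x :: xs) i 0, PySem.List.pyGetD (x :: xs) (i + 1) 0)) ∘
          (fun k : Nat => (k : Int))) k
        = (fun k => ((x :: xs).getD k 0, (x :: xs).getD (k + 1) 0)) k := by
      intro k
      simp only [Function.comp]
      have : ((k : Int) + 1) = ((k + 1 : Nat) : Int) := by push_cast; ring
      rw [this, PySem.List.pyGetD_natCast, PySem.List.pyGetD_natCast]
    rw [List.map_congr_left (fun k _ => h2 k)]
    simpa using range_map_pairs x xs

-- B's two-counter fold computes the two countP's
lemma fold_two_counters (ps : List (Int × Int)) (a b : Int) :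
    ps.foldl
      (fun (s : Int × Int) xy =>
        if xy.1 < xy.2 then (s.1 + 1, s.2)
        else if xy.1 > xy.2 then (s.1, s.2 + 1)
        else s) (a, b)
    = (a + (ps.countP (fun p => decide (p.1 < p.2)) : Int),
       b + (ps.countP (fun p => decide (p.1 > p.2)) : Int)) := by
  induction ps generalizing a b with
  | nil => simp
  | cons p ps ih =>
    simp only [List.foldl_cons, List.countP_cons]
    by_cases h1 : p.1 < p.2
    · have h2 : ¬ p.1 > p.2 := by omega
      rw [if_pos h1, ih]
      simp only [h1, h2, decide_true, decide_false, Prod.mk.injEq]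
      constructor <;> push_cast <;> ring
    · rw [if_neg h1]
      by_cases h2 : p.1 > p.2
      · rw [if_pos h2, ih]
        simp only [h1, h2, decide_true, decide_false, Prod.mk.injEq]
        constructor <;> push_cast <;> ring
      · rw [if_neg h2, ih]
        simp [h1, h2]

-- A's ascent-counting loop equals countP over the pairs
lemma foldl_range_count_lt (arr : List Int) :
    (PySem.List.pyRange 0 ((arr.length : Int) - 1)).foldl
      (fun count i =>
        if PySem.List.pyGetD arr i 0 < PySem.List.pyGetD arr (i + 1) 0 then count + 1 else count) 0
    = ((arr.zip (arr.drop 1)).countP (fun q => decide (q.1 < q.2)) : Int) := by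
  have h := PySem.List.foldl_count_if
    (fun i => decide (PySem.List.pyGetD arr i 0 < PySem.List.pyGetD arr (i + 1) 0))
    (PySem.List.pyRange 0 ((arr.length : Int) - 1)) 0
  simp only [decide_eq_true_eq, zero_add] at h
  rw [h, ← pyRange_pairs arr, List.countP_map]
  rfl

-- A's descent-counting loop equals countP over the pairs
lemma foldl_range_count_gt (arr : List Int) :
    (PySem.List.pyRange 0 ((arr.length : Int) - 1)).foldl
      (fun count i =>
        if PySem.List.pyGetD arr i 0 > PySem.List.pyGetD arr (i + 1) 0 then count + 1 else count) 0
    = ((arr.zip (arr.drop 1)).countP (fun q => decide (q.1 > q.2)) : Int) := by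
  have h := PySem.List.foldl_count_if
    (fun i => decide (PySem.List.pyGetD arr i 0 > PySem.List.pyGetD arr (i + 1) 0))
    (PySem.List.pyRange 0 ((arr.length : Int) - 1)) 0
  simp only [decide_eq_true_eq, zero_add] at h
  rw [h, ← pyRange_pairs arr, List.countP_map]
  rfl

-- `all` over the range equals `all` over the pairs
lemma all_range_pairs_lt (arr : List Int) :
    (PySem.List.pyRange 0 ((arr.length : Int) - 1)).all
      (fun i => decide (PySem.List.pyGetD arr i 0 < PySem.List.pyGetD arr (i + 1) 0))
    = (arr.zip (arr.drop 1)).all (fun q => decide (q.1 < q.2)) := by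
  rw [← pyRange_pairs arr, List.all_map]
  rfl

lemma all_range_pairs_gt (arr : List Int) :
    (PySem.List.pyRange 0 ((arr.length : Int) - 1)).all
      (fun i => decide (PySem.List.pyGetD arr i 0 > PySem.List.pyGetD arr (i + 1) 0))
    = (arr.zip (arr.drop 1)).all (fun q => decide (q.1 > q.2)) := by
  rw [← pyRange_pairs arr, List.all_map]
  rfl

-- pairs = max(len(arr)-1, 0) is the number of adjacent pairs
lemma pairs_eq_length (arr : List Int) :
    max ((arr.length : Int) - 1) 0 = ((arr.zip (arr.drop 1)).length : Int) := by
  cases arr with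
  | nil => rfl
  | cons x xs =>
    simp only [List.length_zip, List.length_cons, List.length_drop]
    omega

-- all-pairs ↔ the count reaches the number of pairs
lemma all_iff_count_eq (ps : List (Int × Int)) (q : Int × Int → Bool) :
    ps.all q = true ↔ (ps.countP q : Int) = (ps.length : Int) := by
  rw [List.all_eq_true, Int.natCast_inj]
  exact (List.countP_eq_length).symm

-- ===== VERDICT (by name: the statement is the Claim_ definition above) =====
theorem maxNtype_spec : Claim_equal_maxNtype := by
  intro arr _
  unfold Spec_maxNtype maxNtype maxNtype_alt maxNtypeCase3 maxNtypeCase4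
  simp only [fold_two_counters, zero_add,
    foldl_range_count_lt arr, foldl_range_count_gt arr,
    all_range_pairs_lt arr, all_range_pairs_gt arr,
    pairs_eq_length arr, ← all_iff_count_eq]
  split_ifs <;> first | rfl | omega
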